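-- pv_equiv track=rewrite | github.com/keithhenning/technical-interviews | python/08_070.py | maxHolidayJoy
-- ===== SOURCE A (Python) =====
-- def maxHolidayJoy(joyRatings, minCards, maxCards):
--   n = len(joyRatings)
--   if n < minCards:
--      return 0
--
--   # Calculate sum of initial minimum window
--   current_sum = sum(joyRatings[:minCards])
--   max_joy = current_sum
--
--   # Try each valid window size from minCards to maxCards
--   for window_size in range(minCards, min(maxCards + 1, n + 1)):
--      # If increasing window size from previous iteration
--      if window_size > minCards:
--         current_sum += joyRatings[window_size - 1]
--
--      # Initial window of current size
--      temp_max = current_sum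
--
--      # Slide the window across the array
--      for i in range(window_size, n):
--         current_sum += joyRatings[i] - joyRatings[i - window_size]
--         temp_max = max(temp_max, current_sum)
--
--      max_joy = max(max_joy, temp_max)
--
--      # Reset current_sum for next window size
--      current_sum = sum(joyRatings[:window_size])
--
--   return max_joy
-- ===== SOURCE B (Python) =====
-- def maxHolidayJoy(joyRatings, minCards, maxCards):
--   n = len(joyRatings)
--   hi = min(maxCards, n)
--   if n < minCards or hi < minCards:
--     # no admissible window size
--     return 0
--   prefix = [0]
--   for x in joyRatings:
--     prefix.append(prefix[-1] + x)
--   return max(prefix[j] - min(prefix[max(0, j - hi): j - minCards + 1])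
--              for j in range(minCards, n + 1))
-- ===== Notes on version B (the rewrite author's own statement) =====
-- stated objective: alternative
-- what changed: B builds a prefix-sum array once and, scanning right endpoints, takes max(prefix[j] - min(prefix slice over the allowed-length window)), replacing A's per-window-size rolling-sum passes with per-size resets.
-- outside the precondition, e.g. on maxHolidayJoy([1, 2, 3], -1, -3): A returns 3, B returns 0; on maxHolidayJoy([5, -2, 4], 2, 1): A returns 3, B returns 0
import Mathlib
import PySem

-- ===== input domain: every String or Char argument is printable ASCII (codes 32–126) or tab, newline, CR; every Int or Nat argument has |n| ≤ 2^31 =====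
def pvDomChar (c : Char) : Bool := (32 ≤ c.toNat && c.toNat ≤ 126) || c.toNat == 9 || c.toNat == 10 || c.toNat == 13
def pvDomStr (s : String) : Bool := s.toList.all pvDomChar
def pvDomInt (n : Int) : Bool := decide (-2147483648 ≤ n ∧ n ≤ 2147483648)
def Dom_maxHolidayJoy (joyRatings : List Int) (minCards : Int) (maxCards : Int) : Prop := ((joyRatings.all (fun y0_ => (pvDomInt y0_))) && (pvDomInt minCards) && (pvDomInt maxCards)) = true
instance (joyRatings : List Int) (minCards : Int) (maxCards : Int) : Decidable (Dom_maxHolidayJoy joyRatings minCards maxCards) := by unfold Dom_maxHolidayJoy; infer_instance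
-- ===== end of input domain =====

-- B replaces A's per-window-size rolling-sum passes by one prefix-sum array and a per-endpoint
-- min over a prefix slice; equal wherever 0 ≤ minCards and minCards ≤ maxCards or minCards > len.


-- ===== PORT A =====
-- literal transliteration: per window size, a rolling sum slides across the array,
-- current_sum is reset to sum(joyRatings[:window_size]) after each size.
def maxHolidayJoy (joyRatings : List Int) (minCards : Int) (maxCards : Int) : Int :=
  let n : Int := joyRatings.length
  if n < minCards then 0
  else
    let currentSum := (PySem.List.slice joyRatings none (some minCards)).sum
    -- state = (current_sum, max_joy)
    let res := (PySem.List.pyRange minCards (min (maxCards + 1) (n + 1)) 1).foldl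
      (fun (st : Int × Int) w =>
        let cs := if w > minCards then st.1 + PySem.List.pyGetD joyRatings (w - 1) 0 else st.1
        -- inner slide: state = (current_sum, temp_max)
        let inner := (PySem.List.pyRange w n 1).foldl
          (fun (p : Int × Int) i =>
            (p.1 + PySem.List.pyGetD joyRatings i 0 - PySem.List.pyGetD joyRatings (i - w) 0,
             max p.2 (p.1 + PySem.List.pyGetD joyRatings i 0 - PySem.List.pyGetD joyRatings (i - w) 0)))
          (cs, cs)
        ((PySem.List.slice joyRatings none (some w)).sum, max st.2 inner.2))
      (currentSum, currentSum)
    res.2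

-- ===== PORT B =====
-- literal transliteration of Source B: build prefix sums once, then one max over right endpoints,
-- each taking min over the slice of admissible left prefix indices.
-- (.getD 0 mirrors Python's max()/min() which raise on empty input — impossible under Pre_.)
def maxHolidayJoy_alt (joyRatings : List Int) (minCards : Int) (maxCards : Int) : Int :=
  let n : Int := joyRatings.length
  let hi := min maxCards n
  if n < minCards ∨ hi < minCards then 0
  else
    let prefixSums := joyRatings.foldl (fun (acc : List Int) x => acc ++ [PySem.List.pyGetD acc (-1) 0 + x]) [(0 : Int)]
    ((PySem.List.max?
        ((PySem.List.pyRange minCards (n + 1) 1).map (fun j =>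
          PySem.List.pyGetD prefixSums j 0 -
          ((PySem.List.min? (PySem.List.slice prefixSums (some (max 0 (j - hi))) (some (j - minCards + 1))) (fun x => x)).getD 0)))
        (fun x => x)).getD 0)

-- ===== PRECONDITION & SPEC =====
-- Pre_ excludes minCards < 0 (negative card counts, outside the natural domain; A raises IndexError on
-- most of them) and maxCards < minCards ≤ len (contradictory bounds: no admissible window size, where A's
-- unslid initial-window sum is an artefact of its loop structure and B returns 0).
def Pre_maxHolidayJoy (joyRatings : List Int) (minCards : Int) (maxCards : Int) : Prop :=
  0 ≤ minCards ∧ (minCards ≤ maxCards ∨ (joyRatings.length : Int) < minCards)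
instance (joyRatings : List Int) (minCards : Int) (maxCards : Int) : Decidable (Pre_maxHolidayJoy joyRatings minCards maxCards) := by unfold Pre_maxHolidayJoy; infer_instance

def pvWitness_maxHolidayJoy : List Int × Int × Int := ([1, -2, 3, 4], 1, 3)

def Spec_maxHolidayJoy (joyRatings : List Int) (minCards : Int) (maxCards : Int) (out : Int) : Prop := out = maxHolidayJoy_alt joyRatings minCards maxCards
instance (joyRatings : List Int) (minCards : Int) (maxCards : Int) (out : Int) : Decidable (Spec_maxHolidayJoy joyRatings minCards maxCards out) := by unfold Spec_maxHolidayJoy; infer_instance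

-- ===== CLAIM (what is proved, stated in full; the proofs are below) =====
def Claim_equal_maxHolidayJoy : Prop := ∀ (joyRatings : List Int) (minCards : Int) (maxCards : Int), Dom_maxHolidayJoy joyRatings minCards maxCards → Pre_maxHolidayJoy joyRatings minCards maxCards → Spec_maxHolidayJoy joyRatings minCards maxCards (maxHolidayJoy joyRatings minCards maxCards)

-- ===== LEMMAS AND PROOFS =====

-- prefix sum of the first i elements (i an Int index, as in both ports)
def pvPref (xs : List Int) (i : Int) : Int := (xs.take i.toNat).sum

-- max over all windows of size w: sup over right endpoints j ∈ [w, n] of pvPref j - pvPref (j-w)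
-- (the insert makes the index set unconditionally nonempty; it collapses when w ≤ n)
noncomputable def pvInnerVal (xs : List Int) (w : Int) : Int :=
  (insert w (Finset.Icc w (xs.length : Int))).sup' (Finset.insert_nonempty _ _)
    (fun j => pvPref xs j - pvPref xs (j - w))

-- B's per-endpoint value: pvPref j minus the min admissible left prefix (window lengths in [m, h])
noncomputable def pvBVal (xs : List Int) (m h j : Int) : Int :=
  pvPref xs j - (insert (j - m) (Finset.Icc (max 0 (j - h)) (j - m))).inf' (Finset.insert_nonempty _ _) (pvPref xs)

theorem pvPref_zero (xs : List Int) : pvPref xs 0 = 0 := rfl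

theorem pvPref_succ (xs : List Int) (i : Int) (h0 : 0 ≤ i) (h : i < (xs.length : Int)) :
    pvPref xs (i + 1) = pvPref xs i + xs[i.toNat]'(by omega) := by
  have : (i + 1).toNat = i.toNat + 1 := by omega
  rw [pvPref, pvPref, this, List.sum_take_succ]

theorem pvIcc_succ_right (a b : Int) (h : a ≤ b + 1) :
    Finset.Icc a (b + 1) = insert (b + 1) (Finset.Icc a b) := by
  ext x; simp only [Finset.mem_Icc, Finset.mem_insert]; omega

theorem pvInnerVal_eq (xs : List Int) (w : Int) (hw : 0 ≤ w) (hwn : w ≤ (xs.length : Int))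
    (H : (Finset.Icc w (xs.length : Int)).Nonempty) :
    pvInnerVal xs w = (Finset.Icc w (xs.length : Int)).sup' H (fun j => pvPref xs j - pvPref xs (j - w)) := by
  unfold pvInnerVal
  exact Finset.sup'_congr _ (Finset.insert_eq_of_mem (by simp [Finset.mem_Icc]; omega)) (fun x => congrFun rfl)

theorem pvBVal_eq (xs : List Int) (m h j : Int) (hm : 0 ≤ m) (hmh : m ≤ h) (hj : m ≤ j)
    (H : (Finset.Icc (max 0 (j - h)) (j - m)).Nonempty) :
    pvBVal xs m h j = pvPref xs j - (Finset.Icc (max 0 (j - h)) (j - m)).inf' H (pvPref xs) := by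
  unfold pvBVal
  congr 1
  exact Finset.inf'_congr _ (Finset.insert_eq_of_mem (by simp [Finset.mem_Icc]; omega)) (fun x _ => rfl)

theorem pvSup'_Icc_succ (a b : Int) (hab : a ≤ b) (f : Int → Int)
    (H : (Finset.Icc a b).Nonempty) (H' : (Finset.Icc a (b + 1)).Nonempty) :
    (Finset.Icc a (b + 1)).sup' H' f = max ((Finset.Icc a b).sup' H f) (f (b + 1)) := by
  rw [Finset.sup'_congr H' (pvIcc_succ_right a b (by omega)) (fun x => congrFun rfl),
      Finset.sup'_insert (H := H)]
  simp [max_comm]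

theorem pvIcoNat_cons (s n : Nat) (h : 0 < n) :
    Finset.Ico s (s + n) = insert s (Finset.Ico (s + 1) (s + n)) := by
  ext x; simp only [Finset.mem_Ico, Finset.mem_insert]; omega

theorem pvFoldlMin (f : Nat → Int) :
    ∀ (n s : Nat) (hn : 0 < n) (acc : Int),
    ((List.range' s n).map f).foldl min acc
      = min acc ((Finset.Ico s (s + n)).inf' ⟨s, by simp only [Finset.mem_Ico]; omega⟩ f) := by
  intro n
  induction n with
  | zero => intro s h; exact absurd h (by omega)
  | succ n ih =>
      intro s _ acc
      rw [List.range'_succ, List.map_cons, List.foldl_cons]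
      by_cases hn : n = 0
      · subst hn
        simp only [List.range', List.map_nil, List.foldl_nil]
        have he : Finset.Ico s (s + 1) = {s} := by ext x; simp only [Finset.mem_Ico, Finset.mem_singleton]; omega
        rw [Finset.inf'_congr _ he (fun x _ => rfl), Finset.inf'_singleton]
      · rw [ih (s + 1) (by omega) (min acc (f s))]
        have he : Finset.Ico (s + 1) (s + 1 + n) = Finset.Ico (s + 1) (s + (n + 1)) := by
          ext x; simp only [Finset.mem_Ico, Finset.mem_singleton]; omega
        rw [Finset.inf'_congr _ he (fun x _ => rfl)]
        have hsplit : (Finset.Ico s (s + (n + 1))).inf' ⟨s, by simp only [Finset.mem_Ico]; omega⟩ f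
            = min (f s) ((Finset.Ico (s + 1) (s + (n + 1))).inf' ⟨s + 1, by simp only [Finset.mem_Ico]; omega⟩ f) := by
          rw [Finset.inf'_congr _ (pvIcoNat_cons s (n + 1) (by omega)) (fun x _ => rfl),
              Finset.inf'_insert]
        rw [hsplit, min_assoc]

theorem pvMin?EqNat (f : Nat → Int) (s n : Nat) (h : 0 < n) :
    PySem.List.min? ((List.range' s n).map f) (fun x => x)
      = some ((Finset.Ico s (s + n)).inf' ⟨s, by simp only [Finset.mem_Ico]; omega⟩ f) := by
  obtain ⟨m, rfl⟩ : ∃ m, n = m + 1 := ⟨n - 1, by omega⟩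
  rw [List.range'_succ, List.map_cons, PySem.List.min?_id_cons]
  by_cases hm : m = 0
  · subst hm
    simp only [List.range', List.map_nil, List.foldl_nil]
    have he : Finset.Ico s (s + 1) = {s} := by ext x; simp only [Finset.mem_Ico, Finset.mem_singleton]; omega
    rw [Finset.inf'_congr _ he (fun x _ => rfl), Finset.inf'_singleton]
  · rw [pvFoldlMin f m (s + 1) (by omega) (f s)]
    have he : Finset.Ico (s + 1) (s + 1 + m) = Finset.Ico (s + 1) (s + (m + 1)) := by
      ext x; simp only [Finset.mem_Ico, Finset.mem_singleton]; omega
    rw [Finset.inf'_congr _ he (fun x _ => rfl)]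
    have hsplit : (Finset.Ico s (s + (m + 1))).inf' ⟨s, by simp only [Finset.mem_Ico]; omega⟩ f
        = min (f s) ((Finset.Ico (s + 1) (s + (m + 1))).inf' ⟨s + 1, by simp only [Finset.mem_Ico]; omega⟩ f) := by
      rw [Finset.inf'_congr _ (pvIcoNat_cons s (m + 1) (by omega)) (fun x _ => rfl),
          Finset.inf'_insert]
    rw [hsplit]

theorem pvIccInt_cons (a b : Int) (h : a ≤ b) :
    Finset.Icc a b = insert a (Finset.Icc (a + 1) b) := by
  ext x; simp only [Finset.mem_Icc, Finset.mem_insert]; omega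

theorem pvFoldlMax (g : Int → Int) (a : Int) :
    ∀ (b : Int) (hab : a + 1 ≤ b) (acc : Int),
    ((PySem.List.pyRange a b 1).map g).foldl max acc
      = max acc ((Finset.Icc a (b - 1)).sup' (Finset.nonempty_Icc.mpr (by omega)) g) := by
  intro b hab
  induction b, hab using Int.le_induction with
  | base =>
      intro acc
      rw [PySem.List.pyRange_one_singleton]
      simp only [List.map_cons, List.map_nil, List.foldl_cons, List.foldl_nil]
      have he : Finset.Icc a (a + 1 - 1) = {a} := by ext x; simp only [Finset.mem_Icc, Finset.mem_singleton]; omega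
      rw [Finset.sup'_congr _ he (fun x => congrFun rfl), Finset.sup'_singleton]
  | succ b hab ih =>
      intro acc
      rw [PySem.List.pyRange_one_succ_right (by omega), List.map_append, List.foldl_append, ih]
      simp only [List.map_cons, List.map_nil, List.foldl_cons, List.foldl_nil]
      have he : Finset.Icc a (b + 1 - 1) = Finset.Icc a ((b - 1) + 1) := by
        ext x; simp only [Finset.mem_Icc, Finset.mem_singleton]; omega
      rw [Finset.sup'_congr _ he (fun x => congrFun rfl),
          pvSup'_Icc_succ a (b - 1) (by omega) g (Finset.nonempty_Icc.mpr (by omega))]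
      have hb : b - 1 + 1 = b := by ring
      rw [hb, max_assoc]

theorem pvMax?Eq (g : Int → Int) (a b : Int) (hab : a < b) :
    PySem.List.max? ((PySem.List.pyRange a b 1).map g) (fun x => x)
      = some ((Finset.Icc a (b - 1)).sup' (Finset.nonempty_Icc.mpr (by omega)) g) := by
  rw [PySem.List.pyRange_one_cons hab, List.map_cons, PySem.List.max?_id_cons]
  by_cases hb : a + 1 = b
  · subst hb
    rw [PySem.List.pyRange_one_eq_nil le_rfl]
    simp only [List.map_nil, List.foldl_nil]
    have he : Finset.Icc a (a + 1 - 1) = {a} := by ext x; simp only [Finset.mem_Icc, Finset.mem_singleton]; omega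
    rw [Finset.sup'_congr _ he (fun x => congrFun rfl), Finset.sup'_singleton]
  · rw [pvFoldlMax g (a + 1) b (by omega) (g a)]
    have hs : (Finset.Icc a (b - 1)).sup' (Finset.nonempty_Icc.mpr (by omega)) g
        = max (g a) ((Finset.Icc (a + 1) (b - 1)).sup' (Finset.nonempty_Icc.mpr (by omega)) g) := by
      rw [Finset.sup'_congr _ (pvIccInt_cons a (b - 1) (by omega)) (fun x => congrFun rfl),
          Finset.sup'_insert (H := Finset.nonempty_Icc.mpr (by omega : a + 1 ≤ b - 1))]
    rw [hs]

-- the prefix-sum list built by B's loop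
theorem pvBuildPrefix (xs : List Int) :
    xs.foldl (fun (acc : List Int) x => acc ++ [PySem.List.pyGetD acc (-1) 0 + x]) [(0 : Int)]
      = (List.range (xs.length + 1)).map (fun k => (xs.take k).sum) := by
  induction xs using List.reverseRecOn with
  | nil => rfl
  | append_singleton ys y ih =>
      rw [List.foldl_append, ih]
      simp only [List.foldl_cons, List.foldl_nil]
      rw [List.range_succ (n := ys.length), List.map_append]
      simp only [List.map_cons, List.map_nil]
      rw [PySem.List.pyGetD_neg_one_append_singleton]
      have hlen : (ys ++ [y]).length + 1 = (ys.length + 1) + 1 := by simp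
      rw [hlen, List.range_succ, List.map_append, List.range_succ, List.map_append]
      simp only [List.map_cons, List.map_nil]
      congr 1
      · congr 1
        · apply List.map_congr_left
          intro k hk
          rw [List.mem_range] at hk
          rw [List.take_append_of_le_length (by omega)]
        · rw [List.take_append_of_le_length le_rfl]
      · have ht : List.take (ys.length + 1) (ys ++ [y]) = ys ++ [y] :=
          List.take_of_length_le (by simp)
        rw [ht, List.sum_append]
        simp

-- slice of the prefix list is a mapped Nat range'
theorem pvSliceRange (f : Nat → Int) (N a l : Nat) (h : a + l ≤ N) :
    (((List.range N).map f).drop a).take l = (List.range' a l).map f := by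
  apply List.ext_getElem
  · simp; omega
  · intro i h1 h2
    simp [List.getElem_range']

-- Nat-indexed inf over prefix sums = Int-indexed inf
theorem pvInfConvert (xs : List Int) (a b : Int) (h0 : 0 ≤ a) (hab : a ≤ b - 1)
    (H : (Finset.Ico a.toNat (a.toNat + (b.toNat - a.toNat))).Nonempty)
    (H' : (Finset.Icc a (b - 1)).Nonempty) :
    (Finset.Ico a.toNat (a.toNat + (b.toNat - a.toNat))).inf' H (fun k => (xs.take k).sum)
      = (Finset.Icc a (b - 1)).inf' H' (pvPref xs) := by
  apply le_antisymm
  · apply Finset.le_inf'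
    intro i hi
    rw [Finset.mem_Icc] at hi
    have hmem : i.toNat ∈ Finset.Ico a.toNat (a.toNat + (b.toNat - a.toNat)) := by
      rw [Finset.mem_Ico]; omega
    have := Finset.inf'_le (fun k => (xs.take k).sum) hmem
    simpa [pvPref] using this
  · apply Finset.le_inf'
    intro k hk
    rw [Finset.mem_Ico] at hk
    have hmem : (k : Int) ∈ Finset.Icc a (b - 1) := by rw [Finset.mem_Icc]; omega
    have := Finset.inf'_le (pvPref xs) hmem
    simpa [pvPref] using this

-- A's inner slide: rolling sum plus running max over right endpoints
theorem pvInnerA (xs : List Int) (w : Int) (h0 : 0 ≤ w) :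
    ∀ (t : Int) (hwt : w ≤ t) (htn : t ≤ (xs.length : Int)),
    (PySem.List.pyRange w t 1).foldl
      (fun (p : Int × Int) i =>
        (p.1 + PySem.List.pyGetD xs i 0 - PySem.List.pyGetD xs (i - w) 0,
         max p.2 (p.1 + PySem.List.pyGetD xs i 0 - PySem.List.pyGetD xs (i - w) 0)))
      (pvPref xs w, pvPref xs w)
    = (pvPref xs t - pvPref xs (t - w),
       (Finset.Icc w t).sup' (Finset.nonempty_Icc.mpr hwt)
         (fun j => pvPref xs j - pvPref xs (j - w))) := by
  intro t hwt
  induction t, hwt using Int.le_induction with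
  | base =>
      intro _
      rw [PySem.List.pyRange_one_eq_nil le_rfl]
      simp [pvPref_zero]
  | succ t hwt ih =>
      intro htn1
      have htn : t < (xs.length : Int) := by omega
      rw [PySem.List.pyRange_one_succ_right (by omega), List.foldl_append, ih (by omega)]
      simp only [List.foldl_cons, List.foldl_nil]
      have hgt : PySem.List.pyGetD xs t 0 = xs[t.toNat]'(by omega) :=
        PySem.List.pyGetD_eq_getElem xs 0 (by omega) (by simpa using htn)
      have hgtw : PySem.List.pyGetD xs (t - w) 0 = xs[(t - w).toNat]'(by omega) :=
        PySem.List.pyGetD_eq_getElem xs 0 (by omega) (by omega)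
      have e1 : pvPref xs t - pvPref xs (t - w) + PySem.List.pyGetD xs t 0 - PySem.List.pyGetD xs (t - w) 0
          = pvPref xs (t + 1) - pvPref xs (t + 1 - w) := by
        rw [hgt, hgtw, pvPref_succ xs t (by omega) htn]
        have : t + 1 - w = (t - w) + 1 := by ring
        rw [this, pvPref_succ xs (t - w) (by omega) (by omega)]
        ring
      rw [e1]
      simp only [Prod.mk.injEq, true_and]
      rw [pvSup'_Icc_succ w t hwt _ (Finset.nonempty_Icc.mpr hwt)]

-- A's outer loop over window sizes
theorem pvOuterA (xs : List Int) (m h : Int) (h0 : 0 ≤ m) (hhn : h ≤ (xs.length : Int)) :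
    ∀ (v : Int) (hv1 : m + 1 ≤ v) (hv2 : v ≤ h + 1),
    (PySem.List.pyRange m v 1).foldl
      (fun (st : Int × Int) w =>
        ((PySem.List.slice xs none (some w)).sum,
         max st.2
           ((PySem.List.pyRange w (xs.length : Int) 1).foldl
             (fun (p : Int × Int) i =>
               (p.1 + PySem.List.pyGetD xs i 0 - PySem.List.pyGetD xs (i - w) 0,
                max p.2 (p.1 + PySem.List.pyGetD xs i 0 - PySem.List.pyGetD xs (i - w) 0)))
             ((if w > m then st.1 + PySem.List.pyGetD xs (w - 1) 0 else st.1),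
              (if w > m then st.1 + PySem.List.pyGetD xs (w - 1) 0 else st.1))).2))
      (pvPref xs m, pvPref xs m)
    = (pvPref xs (v - 1),
       (Finset.Icc m (v - 1)).sup' (Finset.nonempty_Icc.mpr (by omega)) (pvInnerVal xs)) := by
  intro v hv1
  induction v, hv1 using Int.le_induction with
  | base =>
      intro hv2
      have hmn : m ≤ (xs.length : Int) := by omega
      rw [PySem.List.pyRange_one_singleton]
      simp only [List.foldl_cons, List.foldl_nil]
      rw [if_neg (by omega)]
      rw [pvInnerA xs m h0 (xs.length : Int) hmn le_rfl]
      rw [PySem.List.slice_to _ h0]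
      simp only [Prod.mk.injEq]
      constructor
      · show (List.sum (List.take m.toNat xs)) = pvPref xs (m + 1 - 1)
        have : m + 1 - 1 = m := by ring
        rw [this]; rfl
      · have hIe : Finset.Icc m (m + 1 - 1) = {m} := by
          have : m + 1 - 1 = m := by ring
          rw [this, Finset.Icc_self]
        rw [Finset.sup'_congr _ hIe (fun x => congrFun rfl), Finset.sup'_singleton,
            pvInnerVal_eq xs m h0 hmn (Finset.nonempty_Icc.mpr hmn)]
        have : pvPref xs m - pvPref xs 0 ≤ (Finset.Icc m (xs.length : Int)).sup'
            (Finset.nonempty_Icc.mpr hmn) (fun j => pvPref xs j - pvPref xs (j - m)) := by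
          have hmem : m ∈ Finset.Icc m (xs.length : Int) := by simp [Finset.mem_Icc]; omega
          have := Finset.le_sup' (fun j => pvPref xs j - pvPref xs (j - m)) hmem
          simpa using this
        rw [pvPref_zero, sub_zero] at this
        exact max_eq_right this
  | succ v hv1 ih =>
      intro hv2
      have hvh : v ≤ h := by omega
      have hvn : v ≤ (xs.length : Int) := by omega
      rw [PySem.List.pyRange_one_succ_right (by omega), List.foldl_append, ih (by omega)]
      simp only [List.foldl_cons, List.foldl_nil]
      rw [if_pos (by omega)]
      have hg : PySem.List.pyGetD xs (v - 1) 0 = xs[(v - 1).toNat]'(by omega) :=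
        PySem.List.pyGetD_eq_getElem xs 0 (by omega) (by omega)
      have hcs : pvPref xs (v - 1) + PySem.List.pyGetD xs (v - 1) 0 = pvPref xs v := by
        rw [hg]
        have h1 : v = (v - 1) + 1 := by ring
        conv_rhs => rw [h1]
        rw [pvPref_succ xs (v - 1) (by omega) (by omega)]
      rw [hcs, pvInnerA xs v (by omega) (xs.length : Int) hvn le_rfl]
      rw [PySem.List.slice_to _ (by omega : (0:Int) ≤ v)]
      simp only [Prod.mk.injEq]
      constructor
      · show (List.sum (List.take v.toNat xs)) = pvPref xs (v + 1 - 1)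
        have : v + 1 - 1 = v := by ring
        rw [this]; rfl
      · have hIe : Finset.Icc m (v + 1 - 1) = Finset.Icc m ((v - 1) + 1) := by
          have : v + 1 - 1 = (v - 1) + 1 := by ring
          rw [this]
        rw [Finset.sup'_congr _ hIe (fun x => congrFun rfl),
            pvSup'_Icc_succ m (v - 1) (by omega) _ (Finset.nonempty_Icc.mpr (by omega))]
        have hIv : pvInnerVal xs v = (Finset.Icc v (xs.length : Int)).sup'
            (Finset.nonempty_Icc.mpr hvn) (fun j => pvPref xs j - pvPref xs (j - v)) :=
          pvInnerVal_eq xs v (by omega) hvn _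
        have hv1' : (v - 1) + 1 = v := by ring
        rw [hv1', hIv]

-- the exchange of the two maxima: by size then endpoint  =  by endpoint then left index
theorem pvSwap (xs : List Int) (m h : Int) (h0 : 0 ≤ m) (hmh : m ≤ h) (hhn : h ≤ (xs.length : Int)) :
    (Finset.Icc m h).sup' (Finset.nonempty_Icc.mpr hmh) (pvInnerVal xs)
    = (Finset.Icc m (xs.length : Int)).sup' (Finset.nonempty_Icc.mpr (by omega)) (pvBVal xs m h) := by
  apply le_antisymm
  · apply Finset.sup'_le
    intro w hw
    rw [Finset.mem_Icc] at hw
    rw [pvInnerVal_eq xs w (by omega) (by omega) (Finset.nonempty_Icc.mpr (by omega))]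
    apply Finset.sup'_le
    intro j hj
    rw [Finset.mem_Icc] at hj
    have hjmem : j ∈ Finset.Icc m (xs.length : Int) := by rw [Finset.mem_Icc]; omega
    refine le_trans ?_ (Finset.le_sup' (pvBVal xs m h) hjmem)
    rw [pvBVal_eq xs m h j h0 hmh (by omega) (Finset.nonempty_Icc.mpr (by omega))]
    have himem : j - w ∈ Finset.Icc (max 0 (j - h)) (j - m) := by rw [Finset.mem_Icc]; omega
    have := Finset.inf'_le (pvPref xs) himem
    omega
  · apply Finset.sup'_le
    intro j hj
    rw [Finset.mem_Icc] at hj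
    rw [pvBVal_eq xs m h j h0 hmh (by omega) (Finset.nonempty_Icc.mpr (by omega))]
    obtain ⟨i, hi, he⟩ := Finset.exists_mem_eq_inf' (s := Finset.Icc (max 0 (j - h)) (j - m)) (Finset.nonempty_Icc.mpr (by omega)) (pvPref xs)
    rw [Finset.mem_Icc] at hi
    rw [he]
    have hwmem : j - i ∈ Finset.Icc m h := by rw [Finset.mem_Icc]; omega
    refine le_trans ?_ (Finset.le_sup' (pvInnerVal xs) hwmem)
    rw [pvInnerVal_eq xs (j - i) (by omega) (by omega) (Finset.nonempty_Icc.mpr (by omega))]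
    have hjmem : j ∈ Finset.Icc (j - i) (xs.length : Int) := by rw [Finset.mem_Icc]; omega
    have := Finset.le_sup' (fun j2 => pvPref xs j2 - pvPref xs (j2 - (j - i))) hjmem
    simp only at this
    have hji : j - (j - i) = i := by ring
    rw [hji] at this
    exact this

theorem maxHolidayJoy_eq_sup (xs : List Int) (minCards maxCards : Int)
    (h0 : 0 ≤ minCards) (hmm : minCards ≤ maxCards) (hn : minCards ≤ (xs.length : Int)) :
    maxHolidayJoy xs minCards maxCards
    = (Finset.Icc minCards (min maxCards (xs.length : Int))).sup'
        (Finset.nonempty_Icc.mpr (by omega)) (pvInnerVal xs) := by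
  have hminrw : min (maxCards + 1) ((xs.length : Int) + 1) = (min maxCards (xs.length : Int)) + 1 := by
    omega
  have hinit : (xs.take minCards.toNat).sum = pvPref xs minCards := rfl
  simp only [maxHolidayJoy]
  rw [if_neg (by omega)]
  rw [PySem.List.slice_to xs h0, hminrw, hinit]
  rw [pvOuterA xs minCards (min maxCards (xs.length : Int)) h0 (by omega)
        ((min maxCards (xs.length : Int)) + 1) (by omega) le_rfl]
  exact Finset.sup'_congr (Finset.nonempty_Icc.mpr (by omega))
    (by ext x; simp only [Finset.mem_Icc]; omega) (fun x => congrFun rfl)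

theorem maxHolidayJoy_alt_eq_sup (xs : List Int) (minCards maxCards : Int)
    (h0 : 0 ≤ minCards) (hmm : minCards ≤ maxCards) (hn : minCards ≤ (xs.length : Int)) :
    maxHolidayJoy_alt xs minCards maxCards
    = (Finset.Icc minCards (xs.length : Int)).sup'
        (Finset.nonempty_Icc.mpr (by omega)) (pvBVal xs minCards (min maxCards (xs.length : Int))) := by
  simp only [maxHolidayJoy_alt]
  rw [if_neg (by omega)]
  rw [pvBuildPrefix xs]
  rw [pvMax?Eq _ minCards ((xs.length : Int) + 1) (by omega)]
  rw [Option.getD_some]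
  refine Finset.sup'_congr (Finset.nonempty_Icc.mpr (by omega))
    (by ext x; simp only [Finset.mem_Icc]; omega) ?_
  intro j hj
  rw [Finset.mem_Icc] at hj
  set h : Int := min maxCards (xs.length : Int) with hdef
  have hjm : minCards ≤ j := hj.1
  have hjn : j ≤ (xs.length : Int) := by omega
  have hmh : minCards ≤ h := by omega
  have ha0 : (0 : Int) ≤ max 0 (j - h) := le_max_left _ _
  have hb0 : (0 : Int) ≤ j - minCards + 1 := by omega
  have hab : max 0 (j - h) ≤ j - minCards + 1 - 1 := by omega
  -- the prefix lookup
  have hget : PySem.List.pyGetD ((List.range (xs.length + 1)).map (fun k => (xs.take k).sum)) j 0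
      = pvPref xs j := by
    rw [PySem.List.pyGetD_eq_getElem _ 0 (by omega) (by simp; omega)]
    simp [List.getElem_map, List.getElem_range, pvPref]
  -- the slice, its min, and the conversion to an Int-indexed inf
  have hslice : PySem.List.slice ((List.range (xs.length + 1)).map (fun k => (xs.take k).sum))
        (some (max 0 (j - h))) (some (j - minCards + 1))
      = (List.range' (max 0 (j - h)).toNat ((j - minCards + 1).toNat - (max 0 (j - h)).toNat)).map
          (fun k => (xs.take k).sum) := by
    rw [PySem.List.slice_toNat _ ha0 hb0]
    exact pvSliceRange _ _ _ _ (by omega)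
  have hmin : PySem.List.min?
        ((List.range' (max 0 (j - h)).toNat ((j - minCards + 1).toNat - (max 0 (j - h)).toNat)).map
          (fun k => (xs.take k).sum)) (fun x => x)
      = some ((Finset.Ico (max 0 (j - h)).toNat
            ((max 0 (j - h)).toNat + ((j - minCards + 1).toNat - (max 0 (j - h)).toNat))).inf'
          ⟨(max 0 (j - h)).toNat, by simp only [Finset.mem_Ico]; omega⟩ (fun k => (xs.take k).sum)) :=
    pvMin?EqNat _ _ _ (by omega)
  have hconv := pvInfConvert xs (max 0 (j - h)) (j - minCards + 1) ha0 hab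
    ⟨(max 0 (j - h)).toNat, by simp only [Finset.mem_Ico]; omega⟩
    (Finset.nonempty_Icc.mpr (by omega))
  have hsetfix : (Finset.Icc (max 0 (j - h)) (j - minCards + 1 - 1)).inf'
        (Finset.nonempty_Icc.mpr (by omega)) (pvPref xs)
      = (Finset.Icc (max 0 (j - h)) (j - minCards)).inf'
        (Finset.nonempty_Icc.mpr (by omega)) (pvPref xs) :=
    Finset.inf'_congr _ (by ext x; simp only [Finset.mem_Icc]; omega) (fun x _ => rfl)
  rw [hget, hslice, hmin, Option.getD_some, hconv, hsetfix]
  rw [pvBVal_eq xs minCards h j h0 hmh hjm (Finset.nonempty_Icc.mpr (by omega))]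

-- ===== VERDICT (by name: the statement is the Claim_ definition above) =====
theorem maxHolidayJoy_spec : Claim_equal_maxHolidayJoy := by
  intro xs minCards maxCards _ hpre
  obtain ⟨h0, hor⟩ := hpre
  unfold Spec_maxHolidayJoy
  by_cases hlt : (xs.length : Int) < minCards
  · unfold maxHolidayJoy maxHolidayJoy_alt
    rw [if_pos hlt, if_pos (Or.inl hlt)]
  · have hn : minCards ≤ (xs.length : Int) := by omega
    have hmm : minCards ≤ maxCards := by omega
    rw [maxHolidayJoy_eq_sup xs minCards maxCards h0 hmm hn,
        maxHolidayJoy_alt_eq_sup xs minCards maxCards h0 hmm hn,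
        pvSwap xs minCards (min maxCards (xs.length : Int)) h0 (by omega) (by omega)]
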